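-- pv_equiv track=rewrite | github.com/donlaiq/minipc | competitive_programming_website/tests/49.py | solve
-- ===== SOURCE A (Python) =====
-- def solve(arr, k):
--     if not arr or k <= 1:
--         return arr
--     length = len(arr)
--     k = k % length
--     if k == 0:
--         return arr
--
--     result = []
--     for i in range(0, length, k):
--         chunk = arr[i:i+k]
--         if len(chunk) == k:
--             result.extend(chunk[::-1])
--         else:
--             result.extend(chunk)
--     return result
-- ===== SOURCE B (Python) =====
-- def solve(arr, k):
--     if not arr or k <= 1:
--         return arr
--     n = len(arr)
--     k = k % n
--     if k == 0:
--         return arr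
--
--     def src(i):
--         cs = (i // k) * k          # start of i's chunk
--         if cs + k <= n:            # full chunk: mirrored position inside it
--             return arr[cs + k - 1 - (i - cs)]
--         return arr[i]              # partial trailing chunk kept as-is
--
--     return [src(i) for i in range(n)]
-- ===== Notes on version B (the rewrite author's own statement) =====
-- stated objective: alternative
-- what changed: B replaces A's slice-and-reverse chunk construction with a single pass over output indices that computes each element's source position in closed form (no slicing, no reversal).
import Mathlib
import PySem

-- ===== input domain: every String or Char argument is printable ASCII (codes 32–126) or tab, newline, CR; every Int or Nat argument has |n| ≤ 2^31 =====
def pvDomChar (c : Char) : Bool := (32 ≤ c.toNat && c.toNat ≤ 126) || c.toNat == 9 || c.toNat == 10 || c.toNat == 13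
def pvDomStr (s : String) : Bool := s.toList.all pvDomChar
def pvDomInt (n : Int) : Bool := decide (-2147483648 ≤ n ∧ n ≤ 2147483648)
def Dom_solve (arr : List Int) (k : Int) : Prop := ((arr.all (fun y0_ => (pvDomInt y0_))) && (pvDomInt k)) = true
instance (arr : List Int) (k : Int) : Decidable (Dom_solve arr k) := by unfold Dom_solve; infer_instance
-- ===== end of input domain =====

-- B computes each output element's source index in closed form instead of A's slice-and-reverse chunks; alternative decomposition, same cost.

-- ===== PORT A =====
def solve (arr : List Int) (k : Int) : List Int :=
  if arr = [] ∨ k ≤ 1 then arr else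
    let length : Int := arr.length
    let k2 := PySem.Int.mod k length
    if k2 = 0 then arr else
      (PySem.List.pyRange 0 length k2).foldl (fun result i =>
        let chunk := PySem.List.slice arr (some i) (some (i + k2))
        if (chunk.length : Int) = k2 then result ++ chunk.reverse else result ++ chunk) []

-- ===== PORT B =====
def solve_alt (arr : List Int) (k : Int) : List Int :=
  if arr = [] ∨ k ≤ 1 then arr else
    let n := arr.length
    let k2 := PySem.Int.mod k (n : Int)
    if k2 = 0 then arr else
      let K := k2.toNat  -- k2 = k % n is nonnegative here (n > 0), so Nat arithmetic below is exact
      (List.range n).map (fun i =>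
        let cs := i / K * K
        -- arr[idx] with an index provably in [0, n): List.getD is exact for it
        if cs + K ≤ n then arr.getD (cs + K - 1 - (i - cs)) 0 else arr.getD i 0)

-- ===== PRECONDITION & SPEC =====
def Spec_solve (arr : List Int) (k : Int) (out : List Int) : Prop := out = solve_alt arr k
instance (arr : List Int) (k : Int) (out : List Int) : Decidable (Spec_solve arr k out) := by unfold Spec_solve; infer_instance

-- ===== CLAIM (what is proved, stated in full; the proofs are below) =====
def Claim_equal_solve : Prop := ∀ (arr : List Int) (k : Int), Dom_solve arr k → Spec_solve arr k (solve arr k)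

-- ===== LEMMAS AND PROOFS =====

theorem getElem_idx_congr {a b : Nat} (l : List Int) (h : a = b) (ha : a < l.length) :
    l[a]'ha = l[b]'(h ▸ ha) := by subst h; rfl

-- common characterization: reverse each full s-chunk, keep the trailing partial chunk
def chunkRev (s : Nat) (l : List Int) : List Int :=
  if h : 0 < s ∧ s ≤ l.length then
    (l.take s).reverse ++ chunkRev s (l.drop s)
  else l
termination_by l.length
decreasing_by simp [List.length_drop]; omega

theorem chunkRev_nil (s : Nat) : chunkRev s [] = [] := by
  rw [chunkRev, dif_neg (by rintro ⟨h1, h2⟩; simp at h2; omega)]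

theorem length_chunkRev (s : Nat) (l : List Int) : (chunkRev s l).length = l.length := by
  unfold chunkRev
  split
  · rename_i h
    rw [List.length_append, List.length_reverse, List.length_take,
        length_chunkRev s (l.drop s), List.length_drop]
    omega
  · rfl
termination_by l.length
decreasing_by simp [List.length_drop]; omega

theorem pyRange_cons_of_pos (a b s : Int) (hs : 0 < s) (h : a < b) :
    PySem.List.pyRange a b s = a :: PySem.List.pyRange (a + s) b s := by
  rw [PySem.List.pyRange_of_pos _ _ hs, PySem.List.pyRange_of_pos _ _ hs]
  rw [if_pos h]
  have hc : 0 < ((b - a + s - 1) / s).toNat := by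
    have h1 : (1 : Int) ≤ (b - a + s - 1) / s := by
      rw [Int.le_ediv_iff_mul_le hs]; omega
    omega
  obtain ⟨c, hc'⟩ : ∃ c, ((b - a + s - 1) / s).toNat = c + 1 :=
    ⟨_, (Nat.succ_pred_eq_of_pos hc).symm⟩
  rw [hc', List.range_succ_eq_map, List.map_cons, List.map_map]
  congr 1
  · simp
  · have hcn : c = (if a + s < b then ((b - (a + s) + s - 1) / s).toNat else 0) := by
      by_cases hab : a + s < b
      · rw [if_pos hab]
        have e1 : b - a + s - 1 = (b - (a + s) + s - 1) + 1 * s := by ring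
        have e2 : (b - a + s - 1) / s = (b - (a + s) + s - 1) / s + 1 := by
          rw [e1, Int.add_mul_ediv_right _ 1 (by omega)]
        have hp : 0 ≤ (b - (a + s) + s - 1) / s := by
          apply Int.ediv_nonneg <;> omega
        omega
      · rw [if_neg hab]
        have e1 : b - a + s - 1 = (b - a - 1) + 1 * s := by ring
        have e2 : (b - a + s - 1) / s = (b - a - 1) / s + 1 := by
          rw [e1, Int.add_mul_ediv_right _ 1 (by omega)]
        have e3 : (b - a - 1) / s = 0 := Int.ediv_eq_zero_of_lt (by omega) (by omega)
        omega
    rw [← hcn]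
    apply List.map_congr_left
    intro x _
    simp only [Function.comp_apply, Nat.succ_eq_add_one]
    push_cast
    ring

-- A's fold over range(j, n, s) produces acc ++ chunkRev s (arr.drop j)
theorem A_core (arr : List Int) (s : Nat) (hs : 0 < s) :
    ∀ (j : Nat) (acc : List Int),
      (PySem.List.pyRange (j : Int) (arr.length : Int) (s : Int)).foldl (fun result i =>
        let chunk := PySem.List.slice arr (some i) (some (i + (s : Int)))
        if (chunk.length : Int) = (s : Int) then result ++ chunk.reverse else result ++ chunk) acc
      = acc ++ chunkRev s (arr.drop j) := by
  intro j
  induction hj : arr.length - j using Nat.strong_induction_on generalizing j with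
  | _ m ih =>
    intro acc
    by_cases hlt : j < arr.length
    · rw [pyRange_cons_of_pos _ _ _ (by exact_mod_cast hs) (by exact_mod_cast hlt),
          List.foldl_cons]
      have hcastp : ((j : Int) + (s : Int)) = (((j + s : Nat)) : Int) := by push_cast; ring
      have hslice : PySem.List.slice arr (some (j : Int)) (some (((j + s : Nat)) : Int))
          = (arr.drop j).take s := by
        rw [← hcastp]; exact PySem.List.slice_natCast_add arr j s
      simp only [hcastp, hslice]
      have hrec := ih (arr.length - (j + s)) (by omega) (j + s) rfl
      by_cases hfull : s ≤ arr.length - j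
      · have hlen : ((arr.drop j).take s).length = s := by
          simp [List.length_take, List.length_drop]; omega
        rw [if_pos (by rw [hlen])]
        rw [hrec]
        have hcr : chunkRev s (arr.drop j)
            = ((arr.drop j).take s).reverse ++ chunkRev s (arr.drop (j + s)) := by
          have hdd : (arr.drop j).drop s = arr.drop (j + s) := by
            rw [List.drop_drop, Nat.add_comm]
          rw [chunkRev, dif_pos ⟨hs, by simp [List.length_drop]; omega⟩, hdd]
        rw [hcr, List.append_assoc]
      · have hlen : ((arr.drop j).take s).length = arr.length - j := by
          simp [List.length_take, List.length_drop]; omega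
        rw [if_neg (by
          rw [hlen]
          intro hcontra
          have : arr.length - j = s := by exact_mod_cast hcontra
          omega)]
        rw [hrec]
        have hdrop : arr.drop (j + s) = [] := List.drop_eq_nil_of_le (by omega)
        rw [hdrop, chunkRev_nil, List.append_nil]
        have htake : (arr.drop j).take s = arr.drop j :=
          List.take_of_length_le (by simp [List.length_drop]; omega)
        rw [htake]
        have hcr : chunkRev s (arr.drop j) = arr.drop j := by
          rw [chunkRev, dif_neg (by rintro ⟨h1, h2⟩; simp [List.length_drop] at h2; omega)]
        rw [hcr]
    · have hnil : PySem.List.pyRange (j : Int) (arr.length : Int) (s : Int) = [] := by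
        rw [PySem.List.pyRange_of_pos _ _ (by exact_mod_cast hs)]
        rw [if_neg (by exact_mod_cast not_lt.mpr (not_lt.mp hlt))]
        simp
      rw [hnil, List.foldl_nil]
      rw [List.drop_eq_nil_of_le (by omega), chunkRev_nil, List.append_nil]

theorem chunkRev_getD (s : Nat) (hs : 0 < s) (l : List Int) (i : Nat) (hi : i < l.length) :
    (chunkRev s l).getD i 0
    = if i / s * s + s ≤ l.length
      then l.getD (i / s * s + s - 1 - (i - i / s * s)) 0
      else l.getD i 0 := by
  induction hl : l.length using Nat.strong_induction_on generalizing l i with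
  | _ m ih =>
    subst hl
    by_cases hfull : s ≤ l.length
    · have hstep : chunkRev s l = (l.take s).reverse ++ chunkRev s (l.drop s) := by
        rw [chunkRev, dif_pos ⟨hs, hfull⟩]
      rw [List.getD_eq_getElem _ _ (by rw [length_chunkRev]; exact hi)]
      rw [List.getElem_of_eq hstep]
      have hrevlen : (l.take s).reverse.length = s := by
        simp [List.length_take]; omega
      have hltake : (l.take s).length = s := by
        simp [List.length_take]; omega
      by_cases hi2 : i < s
      · have hq : i / s = 0 := Nat.div_eq_of_lt hi2
        rw [if_pos (by rw [hq]; simpa using hfull)]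
        rw [List.getElem_append_left (by omega)]
        rw [List.getElem_reverse, List.getElem_take]
        rw [List.getD_eq_getElem _ _ (show i / s * s + s - 1 - (i - i / s * s) < l.length by
          rw [hq]; omega)]
        exact getElem_idx_congr l (by rw [hltake, hq]; omega) _
      · push_neg at hi2
        rw [List.getElem_append_right (by omega)]
        rw [getElem_idx_congr _ (show i - (l.take s).reverse.length = i - s by rw [hrevlen])]
        have hdl : (l.drop s).length = l.length - s := by simp
        rw [show (chunkRev s (l.drop s))[i - s]'(by rw [length_chunkRev, hdl]; omega)
            = (chunkRev s (l.drop s)).getD (i - s) 0 from (List.getD_eq_getElem _ _ _).symm]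
        have hrec := ih ((l.drop s).length) (by rw [hdl]; omega) (l.drop s) (i - s)
          (by rw [hdl]; omega) rfl
        rw [hrec]
        -- division arithmetic
        have hq1 : 1 ≤ i / s := (Nat.one_le_div_iff hs).mpr hi2
        have hAs : s ≤ i / s * s := by
          have h1 : 1 * s ≤ i / s * s := Nat.mul_le_mul_right s hq1
          omega
        have hAi : i / s * s ≤ i := Nat.div_mul_le_self i s
        have hmlt : i % s < s := Nat.mod_lt _ hs
        have hdm : s * (i / s) + i % s = i := Nat.div_add_mod i s
        have hcm : i / s * s = s * (i / s) := Nat.mul_comm _ _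
        have hdiv : (i - s) / s = i / s - 1 := by
          have h3 : (i / s - 1) * s + s = i / s * s := by
            rw [Nat.sub_mul]; omega
          have h2 : i - s = i % s + (i / s - 1) * s := by omega
          rw [h2, Nat.add_mul_div_right _ _ hs, Nat.div_eq_of_lt hmlt]
          omega
        have hBA : (i - s) / s * s = i / s * s - s := by
          rw [hdiv, Nat.sub_mul]; omega
        have hBi : (i - s) / s * s ≤ i - s := Nat.div_mul_le_self _ _
        by_cases hC : i / s * s + s ≤ l.length
        · rw [if_pos (by rw [hdl]; omega), if_pos hC]
          rw [List.getD_eq_getElem _ _ (show (i - s) / s * s + s - 1 - (i - s - (i - s) / s * s)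
              < (l.drop s).length by rw [hdl]; omega)]
          rw [List.getD_eq_getElem _ _ (show i / s * s + s - 1 - (i - i / s * s) < l.length by
            omega)]
          rw [List.getElem_drop]
          exact getElem_idx_congr l (by omega) _
        · rw [if_neg (by rw [hdl]; omega), if_neg hC]
          rw [List.getD_eq_getElem _ _ (show i - s < (l.drop s).length by rw [hdl]; omega)]
          rw [List.getD_eq_getElem _ _ hi]
          rw [List.getElem_drop]
          exact getElem_idx_congr l (by omega) _
    · have hstep : chunkRev s l = l := by
        rw [chunkRev, dif_neg (by omega)]
      rw [hstep]
      have hq : i / s = 0 := Nat.div_eq_of_lt (by omega)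
      rw [if_neg (by rw [hq]; omega)]

-- B's map over range n equals chunkRev
theorem B_core (arr : List Int) (s : Nat) (hs : 0 < s) :
    (List.range arr.length).map (fun i =>
      let cs := i / s * s
      if cs + s ≤ arr.length then arr.getD (cs + s - 1 - (i - cs)) 0 else arr.getD i 0)
    = chunkRev s arr := by
  apply List.ext_getElem
  · simp [length_chunkRev]
  · intro i h1 h2
    rw [List.getElem_map, List.getElem_range]
    have hin : i < arr.length := by simpa [length_chunkRev] using h2
    rw [show (chunkRev s arr)[i]'h2 = (chunkRev s arr).getD i 0 from
      (List.getD_eq_getElem _ _ _).symm]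
    rw [chunkRev_getD s hs arr i hin]

-- ===== VERDICT (by name: the statement is the Claim_ definition above) =====
theorem solve_spec : Claim_equal_solve := by
  intro arr k _
  simp only [Spec_solve, solve, solve_alt]
  by_cases hg : arr = [] ∨ k ≤ 1
  · rw [if_pos hg, if_pos hg]
  · rw [if_neg hg, if_neg hg]
    push_neg at hg
    have hn : 0 < arr.length := List.length_pos_iff.mpr hg.1
    have hnI : (0 : Int) < (arr.length : Int) := by exact_mod_cast hn
    have hmod : PySem.Int.mod k (arr.length : Int) = k % (arr.length : Int) :=
      PySem.Int.mod_eq_emod_of_pos hnI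
    have hm0 : 0 ≤ PySem.Int.mod k (arr.length : Int) := by
      rw [hmod]; exact Int.emod_nonneg _ (by omega)
    by_cases hz : PySem.Int.mod k (arr.length : Int) = 0
    · rw [if_pos hz, if_pos hz]
    · rw [if_neg hz, if_neg hz]
      have hsp : 0 < (PySem.Int.mod k (arr.length : Int)).toNat := by omega
      have hcast : (((PySem.Int.mod k (arr.length : Int)).toNat : Nat) : Int)
          = PySem.Int.mod k (arr.length : Int) := Int.toNat_of_nonneg hm0
      have hA := A_core arr (PySem.Int.mod k (arr.length : Int)).toNat hsp 0 []
      rw [hcast] at hA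
      simp only [Nat.cast_zero] at hA
      rw [List.drop_zero, List.nil_append] at hA
      rw [hA]
      exact (B_core arr (PySem.Int.mod k (arr.length : Int)).toNat hsp).symm
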